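-- pv_equiv track=rewrite | github.com/Chiggy-Playz/AdventOfCode | 2025/day06.py | part2
-- ===== SOURCE A (Python) =====
-- from operator import add, mul
-- from typing import TypeAlias
--
-- InputType: TypeAlias = list[str]
--
-- def part2(lines: InputType):
--     nums = [0] * len(lines[0])
--
--     for line in lines[:-1]:
--         for i, c in enumerate(line):
--             digit = int(c) if c.isdigit() else 0
--             nums[i] = nums[i] * 10 + digit
--
--     ops = []
--     results = []
--     for op in lines[-1].split():
--         op = op.strip()
--         ops.append(add if op == "+" else mul)
--         results.append(0 if op == "+" else 1)
--
--     i = 0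
--     for num in nums:
--         if num == 0:
--             i += 1
--             continue
--
--         # remove trailing 0 first
--         while num % 10 == 0:
--             num //= 10
--
--         results[i] = ops[i](num, results[i])
--
--     return sum(results)
-- ===== SOURCE B (Python) =====
-- def part2(lines):
--     # Column-major: never builds the nums array. Each column's (trailing-zero-stripped)
--     # value is read directly by scanning the grid rows bottom-up, skipping trailing zero
--     # digits, so the divide-by-10 strip loop disappears. Results accumulate in a dict
--     # keyed by operator index, pre-seeded with each operator's identity.
--     rows, opline = lines[:-1], lines[-1]
--     ops = opline.split()
--     acc = {k: (0 if t == "+" else 1) for k, t in enumerate(ops)}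
--     zeros = 0
--     for j in range(len(lines[0])):
--         num = 0
--         p = 1
--         started = False
--         for row in reversed(rows):
--             if j < len(row):
--                 d = int(row[j]) if row[j].isdigit() else 0
--                 if started or d != 0:
--                     num += d * p
--                     p *= 10
--                     started = True
--         if num == 0:
--             zeros += 1
--         else:
--             acc[zeros] = acc[zeros] + num if ops[zeros] == "+" else acc[zeros] * num
--     return sum(acc.values())
-- ===== Notes on version B (the rewrite author's own statement) =====
-- stated objective: alternative
-- what changed: Inverts the traversal: instead of A's row-major pass that maintains a nums array per column and then a second pass stripping trailing zeros with a divide-by-10 loop and updating a results list in place, B walks the grid column by column, reading each column's already-stripped value directly by scanning the rows bottom-up and skipping trailing zero digits (no nums array, no division loop), and accumulates into a dict pre-seeded with operator identities.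
import Mathlib
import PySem

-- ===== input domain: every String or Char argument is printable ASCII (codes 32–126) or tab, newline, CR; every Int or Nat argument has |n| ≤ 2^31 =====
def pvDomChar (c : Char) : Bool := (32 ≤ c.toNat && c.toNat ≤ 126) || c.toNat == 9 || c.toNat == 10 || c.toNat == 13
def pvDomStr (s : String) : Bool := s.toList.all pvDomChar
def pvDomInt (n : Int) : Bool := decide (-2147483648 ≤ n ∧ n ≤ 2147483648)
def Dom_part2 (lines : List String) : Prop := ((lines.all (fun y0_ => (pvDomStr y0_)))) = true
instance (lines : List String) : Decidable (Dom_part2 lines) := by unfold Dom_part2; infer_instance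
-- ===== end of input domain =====

-- B inverts the traversal (column-major, bottom-up digit scan instead of nums array + strip loop,
-- dict accumulation); alternative decomposition, same cost. Return-value equivalence only.

-- ===== PORT A =====
-- int(c) if c.isdigit() else 0 : exact for the digit chars '0'-'9'
def pvDigitVal (c : Char) : Int := if PySem.Chars.isdigit c then ((c.toNat : Int) - 48) else 0

-- A's first pass: nums[i] = nums[i]*10 + digit, row-major.
-- lines[0] on [] raises in Python (excluded by Pre_); nums[i] with i >= len(nums) raises (excluded by
-- Pre_), here List.set/getD are no-ops there. enumerate indices are >= 0, so .toNat is exact.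
def pvBuildNums (lines : List String) : List Int :=
  (PySem.List.slice lines none (some (-1))).foldl
    (fun nums line =>
      (PySem.List.enumerate line.toList).foldl
        (fun nums ic =>
          nums.set ic.1.toNat (nums.getD ic.1.toNat 0 * 10 + pvDigitVal ic.2))
        nums)
    (List.replicate ((PySem.List.pyGet? lines 0).getD "").toList.length 0)

-- the while-loop `while num % 10 == 0: num //= 10` of A; it is entered only with num ≠ 0
-- (the guard num ≠ 0 only makes the recursion total: on num = 0 Python loops forever)
def pvStripZeros (num : Int) : Int :=
  if _hg : num ≠ 0 ∧ PySem.Int.mod num 10 = 0 then pvStripZeros (PySem.Int.floordiv num 10) else num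
termination_by num.natAbs
decreasing_by
  obtain ⟨hne, hmod⟩ := _hg
  obtain ⟨q, hq⟩ := (PySem.Int.mod_eq_zero_iff_dvd num 10).mp hmod
  have hfd : PySem.Int.floordiv num 10 = q := by
    rw [PySem.Int.floordiv_eq_ediv_of_pos (by norm_num), hq]
    omega
  rw [hfd]
  have hq0 : q ≠ 0 := by rintro rfl; simp at hq; exact hne hq
  have h1 : num.natAbs = 10 * q.natAbs := by rw [hq]; simp [Int.natAbs_mul]
  omega

-- Python's i is an int counter only ever incremented from 0: ported as Nat (indexing needs no wrap).
-- ops[i] / results[i] raise IndexError when i >= len(ops) (excluded by Pre_); getD defaults are never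
-- the value of the function on any input satisfying Pre_.
def part2 (lines : List String) : Int :=
  let nums := pvBuildNums lines
  let st := (PySem.Str.split₀ ((PySem.List.pyGet? lines (-1)).getD "")).foldl
      (fun (st : List (Int → Int → Int) × List Int) op0 =>
        let op := PySem.Str.strip op0
        (st.1 ++ [if op == "+" then (fun a b => a + b) else (fun a b => a * b)],
         st.2 ++ [if op == "+" then (0 : Int) else 1]))
      ([], [])
  let fin := nums.foldl
      (fun (st2 : Nat × List Int) num0 =>
        if num0 = 0 then (st2.1 + 1, st2.2)
        else
          let num := pvStripZeros num0
          (st2.1, st2.2.set st2.1 ((st.1.getD st2.1 (fun a b => a + b)) num (st2.2.getD st2.1 0))))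
      (0, st.2)
  fin.2.foldl (fun a b => a + b) 0

-- ===== PORT B =====
-- B never builds nums: it walks the columns, reading each column's value bottom-up while skipping
-- trailing zero digits, and accumulates into a dict keyed by operator index (Python int keys -> Int).
-- Python's zeros counter is an int only ever incremented from 0: ported as Nat, cast for the key.
-- acc[zeros] / ops[zeros] raise KeyError/IndexError when zeros is past the operators (excluded by
-- Pre_); the getD defaults here are never the value of the function on inputs satisfying Pre_.
def part2_alt (lines : List String) : Int :=
  let rows := PySem.List.slice lines none (some (-1))
  let toks := PySem.Str.split₀ ((PySem.List.pyGet? lines (-1)).getD "")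
  let acc0 := (PySem.List.enumerate toks).foldl
      (fun (d : PySem.Dict Int Int) kt => d.insert kt.1 (if kt.2 == "+" then (0 : Int) else 1))
      PySem.Dict.empty
  let fin := (PySem.List.pyRange 0 (((PySem.List.pyGet? lines 0).getD "").toList.length : Int)).foldl
      (fun (st : Nat × PySem.Dict Int Int) j =>
        let inner := rows.reverse.foldl
          (fun (t : Int × Int × Bool) row =>
            if j < (row.toList.length : Int) then
              -- row[j] is guarded by j < len(row), so the List.getD default is never read
              let d := pvDigitVal (row.toList.getD j.toNat ' ')
              if t.2.2 || decide (d ≠ 0) then (t.1 + d * t.2.1, t.2.1 * 10, true) else t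
            else t)
          (0, 1, false)
        if inner.1 = 0 then (st.1 + 1, st.2)
        else
          (st.1, st.2.insert (st.1 : Int)
            (if toks.getD st.1 "" == "+" then st.2.getD (st.1 : Int) 0 + inner.1
             else st.2.getD (st.1 : Int) 0 * inner.1)))
      (0, acc0)
  (PySem.Dict.values fin.2).foldl (fun a b => a + b) 0

-- ===== PRECONDITION & SPEC =====
-- column j of the grid rows accumulates a nonzero number iff some row has a nonzero digit there
def pvNZ (lines : List String) (j : Nat) : Bool :=
  lines.dropLast.any (fun line =>
    decide (j < line.toList.length) && (line.toList.getD j '0').isDigit && !(line.toList.getD j '0' == '0'))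

-- Pre_ = exactly the inputs where Python A returns: lines nonempty (lines[0]); no grid row longer
-- than lines[0] (nums[i] IndexError); and every nonzero column's operator index — the count of zero
-- columns before it — is inside the operator list (ops[i]/results[i] IndexError).
def Pre_part2 (lines : List String) : Prop :=
  lines ≠ [] ∧
  (∀ line ∈ lines.dropLast, line.toList.length ≤ (lines.headD "").toList.length) ∧
  (∀ j < (lines.headD "").toList.length, pvNZ lines j = true →
     ((List.range j).filter (fun k => !(pvNZ lines k))).length <
       (PySem.Str.split₀ (lines.getLastD "")).length)
instance (lines : List String) : Decidable (Pre_part2 lines) := by unfold Pre_part2; infer_instance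

def pvWitness_part2 : List String := ["12 34", "5  6", "+ *"]

def Spec_part2 (lines : List String) (out : Int) : Prop := out = part2_alt lines
instance (lines : List String) (out : Int) : Decidable (Spec_part2 lines out) := by unfold Spec_part2; infer_instance

-- ===== CLAIM (what is proved, stated in full; the proofs are below) =====
def Claim_equal_part2 : Prop := ∀ (lines : List String), Dom_part2 lines → Pre_part2 lines → Spec_part2 lines (part2 lines)

-- ===== LEMMAS AND PROOFS =====

-- the value a column accumulates top-down (A's orientation)
def pvTop (ds : List Int) : Int := ds.foldl (fun a d => a * 10 + d) 0
-- the digit a row contributes to column j, if any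
def pvColD (j : Nat) (row : String) : Option Int :=
  if j < row.toList.length then some (pvDigitVal (row.toList.getD j ' ')) else none
-- the digits of column j, top to bottom
def pvCol (rows : List String) (j : Nat) : List Int := rows.filterMap (pvColD j)
-- the column with its trailing zero digits removed
def pvStripDs (ds : List Int) : List Int := (ds.reverse.dropWhile (fun d => d == 0)).reverse
-- B's inner accumulator step, on digits (bottom-up)
def pvBstep : (Int × Int × Bool) → Int → (Int × Int × Bool) := fun t d =>
  if t.2.2 || decide (d ≠ 0) then (t.1 + d * t.2.1, t.2.1 * 10, true) else t
-- the invariant tying A's results list to B's dict: the dict holds the results list at keys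
-- 0..n-1 (in order) plus junk entries at keys ≥ n whose value is 0 (only reachable outside Pre_)
def pvRel (n : Nat) (res : List Int) (acc : PySem.Dict Int Int) : Prop :=
  res.length = n ∧ acc.keys.Nodup ∧
  ∃ junk : List (Int × Int),
    acc.items = (List.range n).map (fun m : Nat => ((m : Int), res.getD m 0)) ++ junk ∧
    ∀ p ∈ junk, (n : Int) ≤ p.1 ∧ p.2 = 0

lemma pv_getD_set_self {α : Type} (l : List α) (i : Nat) (a d : α) (h : i < l.length) :
    (l.set i a).getD i d = a := by
  rw [List.getD_eq_getElem?_getD, List.getElem?_set_self h]; rfl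

lemma pv_getD_set_ne {α : Type} (l : List α) (i j : Nat) (a d : α) (h : i ≠ j) :
    (l.set i a).getD j d = l.getD j d := by
  rw [List.getD_eq_getElem?_getD, List.getElem?_set_ne h, ← List.getD_eq_getElem?_getD]

lemma pv_getD_map {β : Type} (f : String → β) (toks : List String) (k : Nat) (hk : k < toks.length) (d : β) :
    (toks.map f).getD k d = f (toks.getD k "") := by
  rw [List.getD_eq_getElem?_getD, List.getD_eq_getElem?_getD, List.getElem?_map,
      List.getElem?_eq_getElem hk]
  rfl

lemma pv_dropWhile_eq (l : List Char) (h : ∀ c ∈ l, PySem.Chars.isspace c = false) :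
    l.dropWhile PySem.Chars.isspace = l := by
  cases l with
  | nil => rfl
  | cons c cs => simp [h c (by simp)]

lemma pv_strip_eq (t : String) (h : ∀ c ∈ t.toList, PySem.Chars.isspace c = false) :
    PySem.Str.strip t = t := by
  have hl : (PySem.Str.strip t).toList = t.toList := by
    rw [PySem.Str.toList_strip]
    simp only [PySem.Chars.strip, PySem.Chars.lstrip, PySem.Chars.rstrip]
    rw [pv_dropWhile_eq _ h, pv_dropWhile_eq, List.reverse_reverse]
    intro c hc; exact h c (by simpa using hc)
  exact String.toList_inj.mp hl

lemma pv_go_nospace : ∀ (s cur : List Char) (acc : List (List Char)),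
    (∀ c ∈ cur, PySem.Chars.isspace c = false) →
    (∀ t ∈ acc, ∀ c ∈ t, PySem.Chars.isspace c = false) →
    ∀ t ∈ PySem.Chars.split₀.go s cur acc, ∀ c ∈ t, PySem.Chars.isspace c = false := by
  intro s
  induction s with
  | nil =>
    intro cur acc hcur hacc t ht
    unfold PySem.Chars.split₀.go at ht
    split at ht
    · exact hacc t (by simpa using ht)
    · simp only [List.mem_reverse, List.mem_cons] at ht
      rcases ht with h | h
      · subst h; intro c hc; exact hcur c (by simpa using hc)
      · exact hacc t h
  | cons c rest ih =>
    intro cur acc hcur hacc t ht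
    unfold PySem.Chars.split₀.go at ht
    by_cases hc : PySem.Chars.isspace c = true
    · rw [if_pos hc] at ht
      split at ht
      · exact ih [] acc (by simp) hacc t ht
      · refine ih [] _ (by simp) ?_ t ht
        intro u hu
        rcases List.mem_cons.mp hu with h | h
        · subst h; intro d hd; exact hcur d (by simpa using hd)
        · exact hacc u h
    · rw [if_neg hc] at ht
      refine ih (c :: cur) acc ?_ hacc t ht
      intro d hd
      rcases List.mem_cons.mp hd with h | h
      · subst h; simpa using hc
      · exact hcur d h

lemma pv_split₀_strip (s : String) : ∀ t ∈ PySem.Str.split₀ s, PySem.Str.strip t = t := by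
  intro t ht
  apply pv_strip_eq
  have hmem : t.toList ∈ PySem.Chars.split₀ s.toList := by
    rw [← PySem.Str.split₀_map_toList]
    exact List.mem_map_of_mem ht
  exact pv_go_nospace s.toList [] [] (by simp) (by simp) t.toList hmem

-- A's second pass (one loop appending to ops and results together) builds two maps over the tokens
lemma pv_pairfold (toks : List String) : ∀ (o : List (Int → Int → Int)) (r : List Int),
    toks.foldl
      (fun (st : List (Int → Int → Int) × List Int) op0 =>
        let op := PySem.Str.strip op0
        (st.1 ++ [if op == "+" then (fun a b => a + b) else (fun a b => a * b)],
         st.2 ++ [if op == "+" then (0 : Int) else 1]))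
      (o, r)
    = (o ++ toks.map (fun t => if PySem.Str.strip t == "+" then (fun a b => a + b) else (fun a b => a * b)),
       r ++ toks.map (fun t => if PySem.Str.strip t == "+" then (0 : Int) else 1)) := by
  induction toks with
  | nil => intro o r; simp
  | cons t ts ih => intro o r; simp only [List.foldl_cons, List.map_cons]; rw [ih]; simp

lemma pv_digit_bounds (c : Char) : 0 ≤ pvDigitVal c ∧ pvDigitVal c ≤ 9 := by
  unfold pvDigitVal
  split
  · rename_i h
    simp only [PySem.Chars.isdigit, Bool.and_eq_true, decide_eq_true_eq, Char.le_def] at h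
    have h1 : (48 : Nat) ≤ c.toNat := h.1
    have h2 : c.toNat ≤ 57 := h.2
    omega
  · omega

lemma pv_col_bounds (rows : List String) (j : Nat) : ∀ d ∈ pvCol rows j, 0 ≤ d ∧ d ≤ 9 := by
  intro d hd
  simp only [pvCol, List.mem_filterMap, pvColD] at hd
  obtain ⟨row, _, hr⟩ := hd
  split at hr
  · cases hr; exact pv_digit_bounds _
  · cases hr

-- ---- the row-major first pass, read per column ----

lemma pv_rowfold_len (l : List (Int × Char)) : ∀ (nums : List Int),
    (l.foldl (fun nums ic => nums.set ic.1.toNat (nums.getD ic.1.toNat 0 * 10 + pvDigitVal ic.2)) nums).length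
      = nums.length := by
  induction l with
  | nil => intro nums; rfl
  | cons p l ih => intro nums; simp only [List.foldl_cons]; rw [ih]; simp

lemma pv_rowstep (cs : List Char) : ∀ (s : Nat) (nums : List Int), s + cs.length ≤ nums.length → ∀ j : Nat,
    ((PySem.List.enumerate cs (s : Int)).foldl
        (fun nums ic => nums.set ic.1.toNat (nums.getD ic.1.toNat 0 * 10 + pvDigitVal ic.2)) nums).getD j 0
      = if s ≤ j ∧ j < s + cs.length then nums.getD j 0 * 10 + pvDigitVal (cs.getD (j - s) ' ')
        else nums.getD j 0 := by
  induction cs with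
  | nil =>
    intro s nums _ j
    rw [if_neg (by simp only [List.length_nil, Nat.add_zero]; omega)]
    simp [PySem.List.enumerate_nil]
  | cons c cs ih =>
    intro s nums hlen j
    rw [PySem.List.enumerate_cons]
    simp only [List.foldl_cons]
    have hcast : ((s : Int) + 1) = ((s + 1 : Nat) : Int) := by push_cast; ring
    have hs : (s : Int).toNat = s := Int.toNat_natCast s
    rw [hcast]
    set nums1 := nums.set (s : Int).toNat ((nums.getD (s : Int).toNat 0) * 10 + pvDigitVal c) with hn1
    have hlen1 : nums1.length = nums.length := by simp [hn1]
    have hb : (s + 1) + cs.length ≤ nums1.length := by rw [hlen1]; simp only [List.length_cons] at hlen; omega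
    rw [ih (s + 1) nums1 hb j]
    by_cases hj : j = s
    · subst hj
      rw [if_neg (by omega), if_pos (by simp only [List.length_cons]; omega)]
      rw [hn1, hs, pv_getD_set_self _ _ _ _ (by simp only [List.length_cons] at hlen; omega)]
      simp
    · have h1 : nums1.getD j 0 = nums.getD j 0 := by rw [hn1, hs]; exact pv_getD_set_ne _ _ _ _ _ (fun h => hj h.symm)
      by_cases hin : s + 1 ≤ j ∧ j < s + 1 + cs.length
      · rw [if_pos hin, if_pos (by simp only [List.length_cons]; omega), h1]
        have : (c :: cs).getD (j - s) ' ' = cs.getD (j - (s + 1)) ' ' := by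
          have h2 : j - s = (j - (s + 1)) + 1 := by omega
          rw [h2]; rfl
        rw [this]
      · rw [if_neg hin, if_neg (by simp only [List.length_cons]; omega), h1]

lemma pv_gridfold (rows : List String) : ∀ (nums : List Int),
    (∀ r ∈ rows, r.toList.length ≤ nums.length) → ∀ j : Nat,
    ((rows.foldl
        (fun nums line =>
          (PySem.List.enumerate line.toList).foldl
            (fun nums ic => nums.set ic.1.toNat (nums.getD ic.1.toNat 0 * 10 + pvDigitVal ic.2)) nums)
        nums).getD j 0)
      = (pvCol rows j).foldl (fun a d => a * 10 + d) (nums.getD j 0) := by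
  induction rows with
  | nil => intro nums _ j; rfl
  | cons row rest ih =>
    intro nums hlen j
    simp only [List.foldl_cons]
    set nums1 := (PySem.List.enumerate row.toList).foldl
        (fun nums ic => nums.set ic.1.toNat (nums.getD ic.1.toNat 0 * 10 + pvDigitVal ic.2)) nums with hn1
    have hlen1 : nums1.length = nums.length := by
      rw [hn1]
      have : PySem.List.enumerate row.toList = PySem.List.enumerate row.toList ((0 : Nat) : Int) := by norm_num
      exact pv_rowfold_len _ nums
    have hrest : ∀ r ∈ rest, r.toList.length ≤ nums1.length := by
      intro r hr; rw [hlen1]; exact hlen r (by simp [hr])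
    rw [ih nums1 hrest j]
    have hstep : nums1.getD j 0
        = if j < row.toList.length then nums.getD j 0 * 10 + pvDigitVal (row.toList.getD j ' ')
          else nums.getD j 0 := by
      rw [hn1]
      have h0 : PySem.List.enumerate row.toList = PySem.List.enumerate row.toList (((0 : Nat) : Int)) := by
        norm_num
      rw [h0, pv_rowstep row.toList 0 nums (by simpa using hlen row (by simp)) j]
      simp
    simp only [pvCol, List.filterMap_cons, pvColD]
    by_cases hj : j < row.toList.length
    · rw [if_pos hj] at hstep
      rw [if_pos hj]
      simp only [List.foldl_cons, hstep]
    · rw [if_neg hj] at hstep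
      rw [if_neg hj, hstep]

lemma pv_build_len (lines : List String) :
    (pvBuildNums lines).length = ((PySem.List.pyGet? lines 0).getD "").toList.length := by
  unfold pvBuildNums
  generalize (PySem.List.slice lines none (some (-1))) = rows
  generalize hr : (List.replicate ((PySem.List.pyGet? lines 0).getD "").toList.length (0 : Int)) = init
  have hlen : init.length = ((PySem.List.pyGet? lines 0).getD "").toList.length := by
    rw [← hr]; simp
  clear hr
  induction rows generalizing init with
  | nil => simpa using hlen
  | cons row rest ih =>
    simp only [List.foldl_cons]
    apply ih
    rw [pv_rowfold_len _ init, hlen]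

lemma pv_head_eq (lines : List String) : (lines.headD "") = (PySem.List.pyGet? lines 0).getD "" := by
  cases lines with
  | nil => rfl
  | cons x r => simp [PySem.List.pyGet?, PySem.List.pyIdx?]

lemma pv_nums_getD (lines : List String)
    (hlen : ∀ line ∈ lines.dropLast, line.toList.length ≤ (lines.headD "").toList.length)
    (j : Nat) :
    (pvBuildNums lines).getD j 0 = pvTop (pvCol lines.dropLast j) := by
  unfold pvBuildNums
  rw [PySem.List.slice_to_neg_one]
  have hz : ∀ j : Nat, (List.replicate ((PySem.List.pyGet? lines 0).getD "").toList.length (0 : Int)).getD j 0 = 0 := by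
    intro j
    rw [List.getD_eq_getElem?_getD, List.getElem?_replicate]
    split <;> rfl
  rw [pv_gridfold lines.dropLast _ (by
    intro r hr
    simp only [List.length_replicate]
    rw [← pv_head_eq]
    exact hlen r hr) j, hz j]
  rfl

-- ---- stripping trailing zeros: arithmetic vs digit-list views ----

lemma pv_fold_zeros : ∀ (es : List Int), (∀ d ∈ es, d = 0) → ∀ a : Int,
    es.foldl (fun a d => a * 10 + d) a = a * 10 ^ es.length := by
  intro es
  induction es with
  | nil => intro _ a; simp
  | cons e es ih =>
    intro hz a
    have he : e = 0 := hz e (by simp)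
    simp only [List.foldl_cons, he, add_zero]
    rw [ih (fun d hd => hz d (by simp [hd])) (a * 10)]
    rw [List.length_cons, pow_succ]
    ring

lemma pv_top_decomp (ds : List Int) :
    pvTop ds = pvTop (pvStripDs ds) * 10 ^ (ds.reverse.takeWhile (fun d => d == 0)).length := by
  have hds : ds = (pvStripDs ds) ++ (ds.reverse.takeWhile (fun d => d == 0)).reverse := by
    unfold pvStripDs
    rw [← List.reverse_append, List.takeWhile_append_dropWhile, List.reverse_reverse]
  conv_lhs => rw [hds]
  unfold pvTop
  rw [List.foldl_append]
  rw [pv_fold_zeros _ (by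
    intro d hd
    have := List.mem_takeWhile_imp (List.mem_reverse.mp hd)
    simpa using this)]
  simp

lemma pv_dropWhile_head {α : Type} (p : α → Bool) : ∀ (l : List α) (b : α) (l' : List α),
    l.dropWhile p = b :: l' → p b = false := by
  intro l
  induction l with
  | nil => intro b l' h; simp at h
  | cons x xs ih =>
    intro b l' h
    rw [List.dropWhile_cons] at h
    split at h
    · exact ih b l' h
    · rename_i hpx; cases h; simpa using hpx

lemma pv_fold_nonneg : ∀ (ds : List Int), (∀ d ∈ ds, 0 ≤ d) → ∀ a : Int, 0 ≤ a →
    0 ≤ ds.foldl (fun a d => a * 10 + d) a := by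
  intro ds
  induction ds with
  | nil => intro _ a ha; simpa using ha
  | cons d ds ih =>
    intro h a ha
    simp only [List.foldl_cons]
    exact ih (fun x hx => h x (by simp [hx])) _ (by have := h d (by simp); omega)

lemma pv_strip_props (ds : List Int) (hb : ∀ d ∈ ds, 0 ≤ d ∧ d ≤ 9)
    (d : Int) (t' : List Int) (ht : ds.reverse.dropWhile (fun d => d == 0) = d :: t') :
    pvTop (pvStripDs ds) ≠ 0 ∧ ¬ (10 : Int) ∣ pvTop (pvStripDs ds) := by
  have hdne : d ≠ 0 := by
    have := pv_dropWhile_head _ _ _ _ ht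
    simpa using this
  have hdmem : d ∈ ds := by
    have h1 : d ∈ ds.reverse.dropWhile (fun d => d == 0) := by rw [ht]; simp
    have h2 : d ∈ ds.reverse := (List.dropWhile_sublist _).mem h1
    exact List.mem_reverse.mp h2
  have hdb := hb d hdmem
  have hrec : pvTop (pvStripDs ds) = pvTop t'.reverse * 10 + d := by
    unfold pvStripDs
    rw [ht, List.reverse_cons]
    unfold pvTop
    rw [List.foldl_append]
    rfl
  have ht'nn : 0 ≤ pvTop t'.reverse := by
    apply pv_fold_nonneg
    · intro x hx
      have h1 : x ∈ ds.reverse.dropWhile (fun d => d == 0) := by rw [ht]; simp [List.mem_reverse.mp hx]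
      exact (hb x (List.mem_reverse.mp ((List.dropWhile_sublist _).mem h1))).1
    · omega
  rw [hrec]
  constructor
  · omega
  · omega

lemma pv_stripZeros_mul_pow (x : Int) (hx : x ≠ 0) (hd : ¬ (10 : Int) ∣ x) : ∀ z : Nat,
    pvStripZeros (x * 10 ^ z) = x := by
  intro z
  induction z with
  | zero =>
    rw [pvStripZeros]
    rw [dif_neg]
    · simp
    · rw [PySem.Int.mod_eq_zero_iff_dvd]
      simp only [pow_zero, mul_one]
      tauto
  | succ n ih =>
    rw [pvStripZeros]
    rw [dif_pos]
    · have hq : PySem.Int.floordiv (x * 10 ^ (n + 1)) 10 = x * 10 ^ n := by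
        rw [PySem.Int.floordiv_eq_ediv_of_pos (by norm_num)]
        rw [pow_succ, ← mul_assoc]
        exact Int.mul_ediv_cancel _ (by norm_num)
      rw [hq, ih]
    · constructor
      · positivity
      · rw [PySem.Int.mod_eq_zero_iff_dvd]
        exact ⟨x * 10 ^ n, by ring⟩

lemma pv_colfacts (ds : List Int) (hb : ∀ d ∈ ds, 0 ≤ d ∧ d ≤ 9) :
    (pvTop (pvStripDs ds) = 0 ↔ pvTop ds = 0) ∧
    (pvTop ds ≠ 0 → pvStripZeros (pvTop ds) = pvTop (pvStripDs ds)) := by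
  have hdec := pv_top_decomp ds
  rcases hcase : ds.reverse.dropWhile (fun d => d == 0) with _ | ⟨d, t'⟩
  · have hstrip : pvStripDs ds = [] := by unfold pvStripDs; rw [hcase]; rfl
    have h0 : pvTop (pvStripDs ds) = 0 := by rw [hstrip]; rfl
    have hds0 : pvTop ds = 0 := by rw [hdec, h0]; ring
    constructor
    · constructor <;> intro _ <;> [exact hds0; exact h0]
    · intro h; exact absurd hds0 h
  · obtain ⟨hne, hnd⟩ := pv_strip_props ds hb d t' hcase
    constructor
    · constructor
      · intro h; exact absurd h hne
      · intro h
        rw [hdec] at h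
        have : (10 : Int) ^ (ds.reverse.takeWhile (fun d => d == 0)).length ≠ 0 := by positivity
        exact absurd (by
          rcases mul_eq_zero.mp h with h1 | h1
          · exact h1
          · exact absurd h1 this) hne
    · intro _
      rw [hdec]
      exact pv_stripZeros_mul_pow _ hne hnd _

-- ---- B's inner loop, read as a fold over the column digits ----

lemma pv_binner (rows : List String) (k : Nat) :
    (rows.reverse.foldl
      (fun (t : Int × Int × Bool) row =>
        if ((k : Nat) : Int) < (row.toList.length : Int) then
          let d := pvDigitVal (row.toList.getD ((k : Nat) : Int).toNat ' ')
          if t.2.2 || decide (d ≠ 0) then (t.1 + d * t.2.1, t.2.1 * 10, true) else t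
        else t)
      ((0 : Int), (1 : Int), false))
    = (pvCol rows k).reverse.foldl pvBstep (0, 1, false) := by
  unfold pvCol
  rw [← List.filterMap_reverse, List.foldl_filterMap]
  apply PySem.List.foldl_congr_mem
  intro t row _
  simp only [pvColD, Int.toNat_natCast]
  by_cases hk : k < row.toList.length
  · rw [if_pos (by exact_mod_cast hk), if_pos hk]
    rfl
  · rw [if_neg (by exact_mod_cast hk), if_neg hk]

lemma pv_bfold_true (l : List Int) : ∀ (n p : Int),
    l.foldl pvBstep (n, p, true) = (n + pvTop l.reverse * p, p * 10 ^ l.length, true) := by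
  induction l with
  | nil => intro n p; simp [pvTop]
  | cons d l ih =>
    intro n p
    simp only [List.foldl_cons]
    have hstep : pvBstep (n, p, true) d = (n + d * p, p * 10, true) := by simp [pvBstep]
    rw [hstep, ih]
    have htop : pvTop (d :: l).reverse = pvTop l.reverse * 10 + d := by
      unfold pvTop
      simp only [List.reverse_cons]
      rw [List.foldl_append]
      rfl
    rw [htop]
    simp only [List.length_cons, pow_succ, Prod.mk.injEq]
    refine ⟨by ring, by ring, trivial⟩

lemma pv_bfold_false (l : List Int) :
    (l.foldl pvBstep (0, 1, false)).1 = pvTop (l.dropWhile (fun d => d == 0)).reverse := by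
  induction l with
  | nil => simp [pvTop]
  | cons d l ih =>
    by_cases hd : d = 0
    · subst hd
      have hstep : pvBstep (0, 1, false) (0 : Int) = (0, 1, false) := by simp [pvBstep]
      simp only [List.foldl_cons, hstep]
      rw [ih]
      norm_num
    · have hstep : pvBstep (0, 1, false) d = (0 + d * 1, 1 * 10, true) := by simp [pvBstep, hd]
      simp only [List.foldl_cons, hstep]
      rw [pv_bfold_true]
      have hdw : (d :: l).dropWhile (fun d => d == 0) = d :: l := by
        rw [List.dropWhile_cons_of_neg]; simpa using hd
      rw [hdw]
      have htop : pvTop (d :: l).reverse = pvTop l.reverse * 10 + d := by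
        unfold pvTop
        simp only [List.reverse_cons]
        rw [List.foldl_append]
        rfl
      simp only [htop]
      ring

-- ---- the dict invariant ----

lemma pv_rel_getD_lo (n : Nat) (res : List Int) (acc : PySem.Dict Int Int)
    (h : pvRel n res acc) (c : Nat) (hc : c < n) : acc.getD (c : Int) 0 = res.getD c 0 := by
  obtain ⟨hlen, hnd, junk, hitems, _⟩ := h
  have hmem : ((c : Int), res.getD c 0) ∈ acc.items := by
    rw [hitems]
    apply List.mem_append_left
    exact List.mem_map.mpr ⟨c, List.mem_range.mpr hc, rfl⟩
  exact PySem.Dict.getD_of_mem_items acc hmem hnd 0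

lemma pv_rel_getD_hi (n : Nat) (res : List Int) (acc : PySem.Dict Int Int)
    (h : pvRel n res acc) (c : Nat) (hc : n ≤ c) : acc.getD (c : Int) 0 = 0 := by
  obtain ⟨hlen, hnd, junk, hitems, hjunk⟩ := h
  by_cases hcon : acc.contains (c : Int) = true
  · have hkey : (c : Int) ∈ acc.keys := (PySem.Dict.contains_iff_mem_keys acc _).mp hcon
    have : ∃ p ∈ acc.items, p.1 = (c : Int) := by
      simp only [PySem.Dict.keys, List.mem_map] at hkey
      obtain ⟨p, hp, hp1⟩ := hkey
      exact ⟨p, hp, hp1⟩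
    obtain ⟨p, hp, hp1⟩ := this
    rw [hitems] at hp
    rcases List.mem_append.mp hp with hbase | hj
    · obtain ⟨m, hm, hmp⟩ := List.mem_map.mp hbase
      have : (m : Int) = (c : Int) := by rw [← hp1, ← hmp]
      have hmc : m = c := by exact_mod_cast this
      exact absurd (List.mem_range.mp hm) (by omega)
    · have hp2 := (hjunk p hj).2
      have hmem : ((c : Int), (0 : Int)) ∈ acc.items := by
        have : p = ((c : Int), (0 : Int)) := by
          cases p
          simp at hp1 hp2
          simp [hp1, hp2]
        rw [← this]
        rw [hitems]; exact List.mem_append_right _ hj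
      exact PySem.Dict.getD_of_mem_items acc hmem hnd 0
  · exact PySem.Dict.getD_of_not_contains acc 0 (by simpa using hcon)

lemma pv_rel_contains (n : Nat) (res : List Int) (acc : PySem.Dict Int Int)
    (h : pvRel n res acc) (c : Nat) (hc : c < n) : acc.contains (c : Int) = true := by
  obtain ⟨hlen, hnd, junk, hitems, _⟩ := h
  apply (PySem.Dict.contains_iff_mem_keys acc _).mpr
  simp only [PySem.Dict.keys, List.mem_map]
  exact ⟨((c : Int), res.getD c 0), by
    rw [hitems]; exact List.mem_append_left _ (List.mem_map.mpr ⟨c, List.mem_range.mpr hc, rfl⟩), rfl⟩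

lemma pv_rel_step_lo (n : Nat) (res : List Int) (acc : PySem.Dict Int Int)
    (h : pvRel n res acc) (c : Nat) (hc : c < n) (w : Int) :
    pvRel n (res.set c w) (acc.insert (c : Int) w) := by
  obtain ⟨hlen, hnd, junk, hitems, hjunk⟩ := h
  refine ⟨by simp [hlen], PySem.Dict.nodup_keys_insert acc _ _ hnd, junk, ?_, hjunk⟩
  rw [PySem.Dict.items_insert_of_contains acc w (pv_rel_contains n res acc ⟨hlen, hnd, junk, hitems, hjunk⟩ c hc)]
  rw [hitems, List.map_append]
  congr 1
  · rw [List.map_map]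
    apply List.map_congr_left
    intro m hm
    have hmn : m < n := List.mem_range.mp hm
    by_cases hmc : m = c
    · subst hmc
      simp only [Function.comp]
      rw [if_pos (by simp)]
      rw [pv_getD_set_self _ _ _ _ (by omega)]
    · simp only [Function.comp]
      rw [if_neg (by simpa using fun h => hmc (by exact_mod_cast h))]
      rw [pv_getD_set_ne _ _ _ _ _ (fun h => hmc h.symm)]
  · apply (List.map_congr_left ?_).trans (List.map_id _)
    intro p hp
    have h1 := (hjunk p hp).1
    rw [if_neg]
    · rfl
    · simp only [beq_iff_eq]
      intro hpe
      rw [hpe] at h1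
      have : (n : Int) ≤ (c : Int) := h1
      have : n ≤ c := by exact_mod_cast this
      omega

lemma pv_rel_step_hi (n : Nat) (res : List Int) (acc : PySem.Dict Int Int)
    (h : pvRel n res acc) (c : Nat) (hc : n ≤ c) :
    pvRel n res (acc.insert (c : Int) 0) := by
  obtain ⟨hlen, hnd, junk, hitems, hjunk⟩ := h
  refine ⟨hlen, PySem.Dict.nodup_keys_insert acc _ _ hnd, ?_⟩
  by_cases hcon : acc.contains (c : Int) = true
  · refine ⟨junk.map (fun p => if p.1 == (c : Int) then ((c : Int), (0 : Int)) else p), ?_, ?_⟩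
    · rw [PySem.Dict.items_insert_of_contains acc 0 hcon, hitems, List.map_append]
      congr 1
      apply (List.map_congr_left ?_).trans (List.map_id _)
      intro p hp
      obtain ⟨m, hm, hmp⟩ := List.mem_map.mp hp
      have hmn : m < n := List.mem_range.mp hm
      rw [if_neg]
      · rfl
      · rw [← hmp]
        simp only [beq_iff_eq]
        intro h1
        have : m = c := by exact_mod_cast h1
        omega
    · intro p hp
      obtain ⟨q, hq, hqp⟩ := List.mem_map.mp hp
      by_cases hqc : q.1 == (c : Int)
      · rw [if_pos hqc] at hqp
        rw [← hqp]
        exact ⟨by simpa using (by exact_mod_cast hc : (n : Int) ≤ (c : Int)), rfl⟩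
      · rw [if_neg hqc] at hqp
        rw [← hqp]
        exact hjunk q hq
  · refine ⟨junk ++ [((c : Int), 0)], ?_, ?_⟩
    · rw [PySem.Dict.items_insert_of_not_contains acc 0 (by simpa using hcon), hitems, List.append_assoc]
    · intro p hp
      rcases List.mem_append.mp hp with h1 | h1
      · exact hjunk p h1
      · simp only [List.mem_singleton] at h1
        rw [h1]
        exact ⟨by simpa using (by exact_mod_cast hc : (n : Int) ≤ (c : Int)), rfl⟩

-- ---- the coupled third passes ----

lemma pv_main (toks : List String) (hst : ∀ t ∈ toks, PySem.Str.strip t = t)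
    (vA vB : Nat → Int) :
    ∀ (ks : List Nat) (c : Nat) (res : List Int) (acc : PySem.Dict Int Int),
    pvRel toks.length res acc →
    (∀ k ∈ ks, (vB k = 0 ↔ vA k = 0) ∧ (vA k ≠ 0 → pvStripZeros (vA k) = vB k)) →
    pvRel toks.length
      (ks.foldl (fun (st2 : Nat × List Int) k =>
        if vA k = 0 then (st2.1 + 1, st2.2)
        else (st2.1, st2.2.set st2.1
          (((toks.map (fun t => if PySem.Str.strip t == "+" then (fun a b => a + b) else (fun a b => a * b))).getD st2.1 (fun a b => a + b))
            (pvStripZeros (vA k)) (st2.2.getD st2.1 0)))) (c, res)).2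
      (ks.foldl (fun (st : Nat × PySem.Dict Int Int) k =>
        if vB k = 0 then (st.1 + 1, st.2)
        else (st.1, st.2.insert (st.1 : Int)
          (if toks.getD st.1 "" == "+" then st.2.getD (st.1 : Int) 0 + vB k
           else st.2.getD (st.1 : Int) 0 * vB k))) (c, acc)).2 := by
  intro ks
  induction ks with
  | nil => intro c res acc hrel _; exact hrel
  | cons k ks ih =>
    intro c res acc hrel hfacts
    obtain ⟨hiff, hval⟩ := hfacts k (by simp)
    simp only [List.foldl_cons]
    by_cases hv : vA k = 0
    · rw [if_pos hv, if_pos (hiff.mpr hv)]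
      exact ih (c + 1) res acc hrel (fun k hk => hfacts k (by simp [hk]))
    · rw [if_neg hv, if_neg (fun h => hv (hiff.mp h))]
      rw [← hval hv]
      by_cases hc : c < toks.length
      · have ht : PySem.Str.strip (toks.getD c "") = toks.getD c "" := by
          apply hst
          rw [List.getD_eq_getElem toks "" (by omega)]
          exact List.getElem_mem (by omega)
        have hop : (toks.map (fun t => if PySem.Str.strip t == "+" then (fun a b : Int => a + b) else (fun a b => a * b))).getD c (fun a b => a + b)
            = if toks.getD c "" == "+" then (fun a b : Int => a + b) else (fun a b => a * b) := by
          rw [pv_getD_map _ _ _ hc, ht]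
        have hdict : acc.getD (c : Int) 0 = res.getD c 0 := pv_rel_getD_lo _ _ _ hrel c hc
        have hw : (if toks.getD c "" == "+" then acc.getD (c : Int) 0 + pvStripZeros (vA k)
              else acc.getD (c : Int) 0 * pvStripZeros (vA k))
            = ((toks.map (fun t => if PySem.Str.strip t == "+" then (fun a b : Int => a + b) else (fun a b => a * b))).getD c (fun a b => a + b))
                (pvStripZeros (vA k)) (res.getD c 0) := by
          rw [hop, hdict]
          split <;> ring
        rw [hw]
        exact ih c _ _ (pv_rel_step_lo _ _ _ hrel c hc _) (fun k hk => hfacts k (by simp [hk]))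
      · have hcn : toks.length ≤ c := by omega
        have hlen : res.length = toks.length := hrel.1
        have hset : res.set c (((toks.map (fun t => if PySem.Str.strip t == "+" then (fun a b : Int => a + b) else (fun a b => a * b))).getD c (fun a b => a + b)) (pvStripZeros (vA k)) (res.getD c 0)) = res := by
          apply List.set_eq_of_length_le
          omega
        have htok : toks.getD c "" = "" := List.getD_eq_default _ _ (by omega)
        have hzero : (if toks.getD c "" == "+" then acc.getD (c : Int) 0 + pvStripZeros (vA k)
              else acc.getD (c : Int) 0 * pvStripZeros (vA k)) = 0 := by
          rw [htok, if_neg (by simp), pv_rel_getD_hi _ _ _ hrel c hcn]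
          ring
        rw [hset, hzero]
        exact ih c _ _ (pv_rel_step_hi _ _ _ hrel c hcn) (fun k hk => hfacts k (by simp [hk]))

-- ---- the initial dict and the final sum ----

lemma pv_acc0_rel (toks : List String) (hst : ∀ t ∈ toks, PySem.Str.strip t = t) :
    pvRel toks.length
      (toks.map (fun t => if PySem.Str.strip t == "+" then (0 : Int) else 1))
      ((PySem.List.enumerate toks).foldl
        (fun (d : PySem.Dict Int Int) kt => d.insert kt.1 (if kt.2 == "+" then (0 : Int) else 1))
        PySem.Dict.empty) := by
  have hitems : ((PySem.List.enumerate toks).foldl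
        (fun (d : PySem.Dict Int Int) kt => d.insert kt.1 (if kt.2 == "+" then (0 : Int) else 1))
        PySem.Dict.empty).items
      = (PySem.List.enumerate toks).map (fun kt => (kt.1, if kt.2 == "+" then (0 : Int) else 1)) := by
    have h := PySem.Dict.items_foldl_insert_fresh (PySem.List.enumerate toks)
      (fun kt => kt.1) (fun kt => if kt.2 == "+" then (0 : Int) else 1) PySem.Dict.empty
      (by intro a _; simp) (by
        rw [PySem.List.map_fst_enumerate]
        exact PySem.List.nodup_pyRange_one _ _)
    simpa using h
  have hbase : (PySem.List.enumerate toks).map (fun kt => (kt.1, if kt.2 == "+" then (0 : Int) else 1))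
      = (List.range toks.length).map (fun m : Nat => ((m : Int),
          (toks.map (fun t => if PySem.Str.strip t == "+" then (0 : Int) else 1)).getD m 0)) := by
    apply List.ext_getElem
    · simp [PySem.List.length_enumerate]
    · intro k h1 h2
      have hk : k < toks.length := by simpa [PySem.List.length_enumerate] using h1
      simp only [List.getElem_map, PySem.List.getElem_enumerate, List.getElem_range]
      have hget : (toks.map (fun t => if PySem.Str.strip t == "+" then (0 : Int) else 1)).getD k 0
          = if PySem.Str.strip (toks.getD k "") == "+" then (0 : Int) else 1 := pv_getD_map _ _ _ hk _
      have hgd : toks.getD k "" = toks[k] := List.getD_eq_getElem toks "" hk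
      have hstk : PySem.Str.strip toks[k] = toks[k] := hst _ (List.getElem_mem hk)
      rw [hget, hgd, hstk]
      simp
  have hnd : ((PySem.List.enumerate toks).foldl
        (fun (d : PySem.Dict Int Int) kt => d.insert kt.1 (if kt.2 == "+" then (0 : Int) else 1))
        PySem.Dict.empty).keys.Nodup := by
    have hkeys : ((PySem.List.enumerate toks).foldl
        (fun (d : PySem.Dict Int Int) kt => d.insert kt.1 (if kt.2 == "+" then (0 : Int) else 1))
        PySem.Dict.empty).keys = (PySem.List.enumerate toks).map (fun kt => kt.1) := by
      simp only [PySem.Dict.keys, hitems, List.map_map]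
      rfl
    rw [hkeys, PySem.List.map_fst_enumerate]
    exact PySem.List.nodup_pyRange_one _ _
  exact ⟨by simp, hnd, [], by rw [hitems, hbase]; simp, by simp⟩

lemma pv_fold_zero_vals (l : List Int) (h : ∀ x ∈ l, x = 0) : ∀ a : Int,
    l.foldl (fun a b => a + b) a = a := by
  induction l with
  | nil => intro a; rfl
  | cons x l ih =>
    intro a
    simp only [List.foldl_cons]
    rw [h x (by simp), add_zero]
    exact ih (fun y hy => h y (by simp [hy])) a

lemma pv_sum_of_rel (n : Nat) (res : List Int) (acc : PySem.Dict Int Int)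
    (h : pvRel n res acc) :
    (PySem.Dict.values acc).foldl (fun a b => a + b) 0 = res.foldl (fun a b => a + b) 0 := by
  obtain ⟨hlen, hnd, junk, hitems, hjunk⟩ := h
  have hvals : PySem.Dict.values acc
      = (List.range n).map (fun m => res.getD m 0) ++ junk.map (fun p => p.2) := by
    simp only [PySem.Dict.values, hitems, List.map_append, List.map_map]
    rfl
  have hres : (List.range n).map (fun m => res.getD m 0) = res := by
    apply List.ext_getElem
    · simp [hlen]
    · intro k h1 h2
      simp only [List.getElem_map, List.getElem_range]
      exact List.getD_eq_getElem res 0 h2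
  rw [hvals, hres, List.foldl_append]
  exact pv_fold_zero_vals _ (by
    intro x hx
    obtain ⟨p, hp, hpx⟩ := List.mem_map.mp hx
    rw [← hpx]
    exact (hjunk p hp).2) _

-- ===== VERDICT (by name: the statement is the Claim_ definition above) =====
theorem part2_spec : Claim_equal_part2 := by
  intro lines _ hpre
  obtain ⟨hne, hrow, _⟩ := hpre
  unfold Spec_part2
  simp only [part2, part2_alt]
  rw [pv_pairfold]
  simp only [List.nil_append]
  rw [PySem.List.slice_to_neg_one, PySem.List.pyRange_zero_nat, List.foldl_map]
  have hnums_eq : pvBuildNums lines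
      = (List.range ((PySem.List.pyGet? lines 0).getD "").toList.length).map
          (fun k => pvTop (pvCol lines.dropLast k)) := by
    apply List.ext_getElem
    · simp [pv_build_len lines]
    · intro k h1 h2
      rw [List.getElem_map, List.getElem_range, ← List.getD_eq_getElem (pvBuildNums lines) 0 h1]
      exact pv_nums_getD lines hrow k
  rw [hnums_eq, List.foldl_map]
  have hst := pv_split₀_strip ((PySem.List.pyGet? lines (-1)).getD "")
  have hB : ∀ (st : Nat × PySem.Dict Int Int) (k : Nat),
      (fun (st : Nat × PySem.Dict Int Int) (k : Nat) =>
        let inner := lines.dropLast.reverse.foldl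
          (fun (t : Int × Int × Bool) row =>
            if ((k : Nat) : Int) < (row.toList.length : Int) then
              let d := pvDigitVal (row.toList.getD ((k : Nat) : Int).toNat ' ')
              if t.2.2 || decide (d ≠ 0) then (t.1 + d * t.2.1, t.2.1 * 10, true) else t
            else t)
          ((0 : Int), (1 : Int), false)
        if inner.1 = 0 then (st.1 + 1, st.2)
        else
          (st.1, st.2.insert (st.1 : Int)
            (if (PySem.Str.split₀ ((PySem.List.pyGet? lines (-1)).getD "")).getD st.1 "" == "+" then
                st.2.getD (st.1 : Int) 0 + inner.1
             else st.2.getD (st.1 : Int) 0 * inner.1))) st k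
      = (fun (st : Nat × PySem.Dict Int Int) (k : Nat) =>
        if pvTop (pvStripDs (pvCol lines.dropLast k)) = 0 then (st.1 + 1, st.2)
        else
          (st.1, st.2.insert (st.1 : Int)
            (if (PySem.Str.split₀ ((PySem.List.pyGet? lines (-1)).getD "")).getD st.1 "" == "+" then
                st.2.getD (st.1 : Int) 0 + pvTop (pvStripDs (pvCol lines.dropLast k))
             else st.2.getD (st.1 : Int) 0 * pvTop (pvStripDs (pvCol lines.dropLast k))))) st k := by
    intro st k
    simp only
    rw [pv_binner lines.dropLast k, pv_bfold_false]
    rfl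
  have hfacts : ∀ k ∈ List.range ((PySem.List.pyGet? lines 0).getD "").toList.length,
      (pvTop (pvStripDs (pvCol lines.dropLast k)) = 0 ↔ pvTop (pvCol lines.dropLast k) = 0) ∧
      (pvTop (pvCol lines.dropLast k) ≠ 0 →
        pvStripZeros (pvTop (pvCol lines.dropLast k)) = pvTop (pvStripDs (pvCol lines.dropLast k))) := by
    intro k _
    exact pv_colfacts (pvCol lines.dropLast k) (pv_col_bounds lines.dropLast k)
  have hrel := pv_main (PySem.Str.split₀ ((PySem.List.pyGet? lines (-1)).getD "")) hst
      (fun k => pvTop (pvCol lines.dropLast k)) (fun k => pvTop (pvStripDs (pvCol lines.dropLast k)))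
      (List.range ((PySem.List.pyGet? lines 0).getD "").toList.length) 0 _ _
      (pv_acc0_rel (PySem.Str.split₀ ((PySem.List.pyGet? lines (-1)).getD "")) hst) hfacts
  rw [PySem.List.foldl_congr_mem _ _ _ ((0 : Nat), _) (fun acc x _ => hB acc x)]
  exact (pv_sum_of_rel _ _ _ hrel).symm
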